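-- pv_equiv track=rewrite | github.com/deadmouser/MintelliFunds | backend/app/services/financial_analyzer_helpers.py | generate_anomaly_recommendations
-- ===== SOURCE A (Python) =====
-- from typing import Dict, Any, List, Tuple, Optional
--
-- def generate_anomaly_recommendations(anomalies: List[Dict[str, Any]]) -> List[str]:
--     """Generate recommendations based on detected anomalies"""
--     if not anomalies:
--         return ["No anomalies detected - transaction patterns appear normal"]
--
--     recommendations = []
--
--     high_severity = [a for a in anomalies if a.get("severity") == "high"]
--     amount_anomalies = [a for a in anomalies if a.get("type") == "amount_anomaly"]
--     merchant_anomalies = [a for a in anomalies if a.get("type") == "merchant_frequency_anomaly"]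
--
--     if high_severity:
--         recommendations.append("Review high-severity anomalies immediately for potential fraud")
--
--     if amount_anomalies:
--         recommendations.append("Verify large or unusual transaction amounts")
--
--     if merchant_anomalies:
--         recommendations.append("Check for recurring charges or subscriptions")
--
--     if len(anomalies) > 10:
--         recommendations.append("Consider reviewing transaction categorization and budgeting")
--
--     recommendations.append("Set up transaction alerts for unusual activity")
--
--     return recommendations
-- ===== SOURCE B (Python) =====
-- def generate_anomaly_recommendations(anomalies):
--     """Generate recommendations based on detected anomalies (single pass with flags)"""
--     if not anomalies:
--         return ["No anomalies detected - transaction patterns appear normal"]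
--
--     high = False
--     amount = False
--     merchant = False
--     count = 0
--     for a in anomalies:
--         high = high or a.get("severity") == "high"
--         t = a.get("type")
--         amount = amount or t == "amount_anomaly"
--         merchant = merchant or t == "merchant_frequency_anomaly"
--         count += 1
--
--     recommendations = []
--     if high:
--         recommendations.append("Review high-severity anomalies immediately for potential fraud")
--     if amount:
--         recommendations.append("Verify large or unusual transaction amounts")
--     if merchant:
--         recommendations.append("Check for recurring charges or subscriptions")
--     if count > 10:
--         recommendations.append("Consider reviewing transaction categorization and budgeting")
--     recommendations.append("Set up transaction alerts for unusual activity")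
--     return recommendations
-- ===== Notes on version B (the rewrite author's own statement) =====
-- stated objective: alternative
-- what changed: Replaced A's three intermediate filtered lists (four traversals of the input) with a single for-loop maintaining three boolean flags and a counter, then emitting the same strings in the same order.
import Mathlib
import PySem

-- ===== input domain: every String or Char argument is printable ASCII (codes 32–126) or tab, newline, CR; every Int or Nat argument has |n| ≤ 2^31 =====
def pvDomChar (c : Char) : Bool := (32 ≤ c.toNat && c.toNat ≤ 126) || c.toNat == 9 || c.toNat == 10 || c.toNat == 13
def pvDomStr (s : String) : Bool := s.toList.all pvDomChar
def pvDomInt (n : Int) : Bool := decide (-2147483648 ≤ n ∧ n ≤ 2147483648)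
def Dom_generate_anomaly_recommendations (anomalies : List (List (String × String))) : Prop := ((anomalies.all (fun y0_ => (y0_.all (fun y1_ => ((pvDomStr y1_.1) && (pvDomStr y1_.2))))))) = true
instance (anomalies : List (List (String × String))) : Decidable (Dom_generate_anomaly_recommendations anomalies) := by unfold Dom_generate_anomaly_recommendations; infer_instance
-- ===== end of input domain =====

-- B replaces A's three intermediate filtered lists with one pass setting boolean flags; same output (objective: alternative).

-- ===== PORT A =====
-- a.get(k): first-match lookup in the association list (Python dict, unique keys)
def pvGet (a : List (String × String)) (k : String) : Option String :=
  (a.find? (fun kv => kv.1 == k)).map (fun kv => kv.2)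

def generate_anomaly_recommendations (anomalies : List (List (String × String))) : List String :=
  if anomalies.isEmpty then
    ["No anomalies detected - transaction patterns appear normal"]
  else
    let recommendations : List String := []
    let high_severity := anomalies.filter (fun a => pvGet a "severity" == some "high")
    let amount_anomalies := anomalies.filter (fun a => pvGet a "type" == some "amount_anomaly")
    let merchant_anomalies := anomalies.filter (fun a => pvGet a "type" == some "merchant_frequency_anomaly")
    let recommendations := if !high_severity.isEmpty then recommendations ++ ["Review high-severity anomalies immediately for potential fraud"] else recommendations
    let recommendations := if !amount_anomalies.isEmpty then recommendations ++ ["Verify large or unusual transaction amounts"] else recommendations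
    let recommendations := if !merchant_anomalies.isEmpty then recommendations ++ ["Check for recurring charges or subscriptions"] else recommendations
    let recommendations := if anomalies.length > 10 then recommendations ++ ["Consider reviewing transaction categorization and budgeting"] else recommendations
    recommendations ++ ["Set up transaction alerts for unusual activity"]

-- ===== PORT B =====
def pvStepB (st : Bool × Bool × Bool × Nat) (a : List (String × String)) : Bool × Bool × Bool × Nat :=
  let high := st.1 || (pvGet a "severity" == some "high")
  let t := pvGet a "type"
  let amount := st.2.1 || (t == some "amount_anomaly")
  let merchant := st.2.2.1 || (t == some "merchant_frequency_anomaly")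
  (high, amount, merchant, st.2.2.2 + 1)

def generate_anomaly_recommendations_alt (anomalies : List (List (String × String))) : List String :=
  if anomalies.isEmpty then
    ["No anomalies detected - transaction patterns appear normal"]
  else
    let st := anomalies.foldl pvStepB (false, false, false, 0)
    let recommendations : List String := []
    let recommendations := if st.1 then recommendations ++ ["Review high-severity anomalies immediately for potential fraud"] else recommendations
    let recommendations := if st.2.1 then recommendations ++ ["Verify large or unusual transaction amounts"] else recommendations
    let recommendations := if st.2.2.1 then recommendations ++ ["Check for recurring charges or subscriptions"] else recommendations
    let recommendations := if st.2.2.2 > 10 then recommendations ++ ["Consider reviewing transaction categorization and budgeting"] else recommendations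
    recommendations ++ ["Set up transaction alerts for unusual activity"]

-- ===== PRECONDITION & SPEC =====
def Spec_generate_anomaly_recommendations (anomalies : List (List (String × String))) (out : List String) : Prop := out = generate_anomaly_recommendations_alt anomalies
instance (anomalies : List (List (String × String))) (out : List String) : Decidable (Spec_generate_anomaly_recommendations anomalies out) := by unfold Spec_generate_anomaly_recommendations; infer_instance

-- ===== CLAIM (what is proved, stated in full; the proofs are below) =====
def Claim_equal_generate_anomaly_recommendations : Prop := ∀ (anomalies : List (List (String × String))), Dom_generate_anomaly_recommendations anomalies → Spec_generate_anomaly_recommendations anomalies (generate_anomaly_recommendations anomalies)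

-- ===== LEMMAS AND PROOFS =====

theorem pvFoldB (l : List (List (String × String))) (b1 b2 b3 : Bool) (n : Nat) :
    l.foldl pvStepB (b1, b2, b3, n) =
      (b1 || l.any (fun a => pvGet a "severity" == some "high"),
       b2 || l.any (fun a => pvGet a "type" == some "amount_anomaly"),
       b3 || l.any (fun a => pvGet a "type" == some "merchant_frequency_anomaly"),
       n + l.length) := by
  induction l generalizing b1 b2 b3 n with
  | nil => simp
  | cons h t ih =>
    simp [pvStepB, ih, Bool.or_assoc]
    omega

theorem pvFilterIsEmpty {α : Type} (p : α → Bool) (l : List α) :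
    (l.filter p).isEmpty = !l.any p := by
  induction l with
  | nil => rfl
  | cons h t ih =>
    by_cases hp : p h <;> simp [List.filter_cons, hp, ih]

theorem generate_anomaly_recommendations_spec : Claim_equal_generate_anomaly_recommendations := by
  intro anomalies _
  unfold Spec_generate_anomaly_recommendations generate_anomaly_recommendations generate_anomaly_recommendations_alt
  by_cases h : anomalies.isEmpty
  · simp [h]
  · rw [pvFoldB]
    simp [h, pvFilterIsEmpty]
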